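-- pv_equiv track=rewrite | github.com/nermadie/CodeForces_Solutions | Hello2024/prob02.py | solve
-- ===== SOURCE A (Python) =====
-- def solve(n, s):
--     count_plus = 0
--     count_minus = 0
--     for i in s:
--         if i == "+":
--             count_plus += 1
--         else:
--             count_minus += 1
--     return abs(count_plus - count_minus)
-- ===== SOURCE B (Python) =====
-- def solve(n, s):
--     # divide-and-conquer signed balance: each char contributes +1 if '+', -1 otherwise;
--     # halve the index interval, sum the two halves, return abs of the total.
--     def bal(lo, hi):
--         if hi - lo == 1:
--             return 1 if s[lo] == "+" else -1
--         if hi == lo: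
--             return 0
--         mid = (lo + hi) // 2
--         return bal(lo, mid) + bal(mid, hi)
--     return abs(bal(0, len(s)))
-- ===== Notes on version B (the rewrite author's own statement) =====
-- stated objective: alternative
-- what changed: Replaces A's linear two-counter loop with a divide-and-conquer recursion over index intervals that sums a single signed +/-1 balance per character and returns its absolute value.
import Mathlib
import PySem

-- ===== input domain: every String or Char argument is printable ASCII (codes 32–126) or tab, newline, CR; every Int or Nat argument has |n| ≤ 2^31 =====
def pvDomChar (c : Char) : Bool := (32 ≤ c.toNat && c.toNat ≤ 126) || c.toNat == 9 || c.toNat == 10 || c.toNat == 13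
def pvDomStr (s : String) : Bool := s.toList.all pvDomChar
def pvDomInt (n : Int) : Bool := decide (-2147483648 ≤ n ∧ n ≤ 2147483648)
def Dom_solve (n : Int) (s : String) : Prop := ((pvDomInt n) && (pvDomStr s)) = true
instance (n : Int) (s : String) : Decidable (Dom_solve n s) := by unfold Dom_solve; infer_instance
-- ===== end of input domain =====

-- B replaces A's linear two-counter loop with a divide-and-conquer recursion summing one signed ±1 balance: an alternative decomposition, not faster.

-- ===== PORT A =====
-- literal port of A: one pass over s, two counters, abs of their difference
def solve (n : Int) (s : String) : Int :=
  let st := s.toList.foldl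
    (fun (p : Int × Int) i => if i == '+' then (p.1 + 1, p.2) else (p.1, p.2 + 1)) (0, 0)
  |st.1 - st.2|

-- ===== PORT B =====
-- literal port of B's inner bal(lo, hi); indices are Nat (always 0 ≤ lo ≤ hi on every call);
-- s[lo] is in range whenever hi ≤ len s, ported as getD (exact there)
-- (Python's second guard is `hi == lo`; stated as `hi ≤ lo` only so the function is total —
-- identical on every reachable call, which has lo ≤ hi; mid = (lo + hi) // 2 is inlined)
def balGo (l : List Char) (lo hi : Nat) : Int :=
  if hi - lo = 1 then (if l.getD lo ' ' == '+' then 1 else -1)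
  else if hi ≤ lo then 0
  else balGo l lo ((lo + hi) / 2) + balGo l ((lo + hi) / 2) hi
termination_by hi - lo
decreasing_by all_goals omega

def solve_alt (n : Int) (s : String) : Int :=
  |balGo s.toList 0 s.toList.length|

-- ===== PRECONDITION & SPEC =====
def Spec_solve (n : Int) (s : String) (out : Int) : Prop := out = solve_alt n s
instance (n : Int) (s : String) (out : Int) : Decidable (Spec_solve n s out) := by unfold Spec_solve; infer_instance

-- ===== CLAIM (what is proved, stated in full; the proofs are below) =====
def Claim_equal_solve : Prop := ∀ (n : Int) (s : String), Dom_solve n s → Spec_solve n s (solve n s)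

-- ===== LEMMAS AND PROOFS =====

-- A's pair-fold computed in closed form
theorem solve_foldl_closed (l : List Char) (a b : Int) :
    l.foldl (fun (p : Int × Int) i => if i == '+' then (p.1 + 1, p.2) else (p.1, p.2 + 1)) (a, b)
      = (a + l.count '+', b + (l.length - l.count '+' : Int)) := by
  induction l generalizing a b with
  | nil => simp
  | cons h t ih =>
      by_cases hc : h = '+'
      · subst hc
        simp only [List.foldl_cons, beq_self_eq_true, if_true]
        rw [ih]
        simp [Prod.ext_iff]
        omega
      · rw [List.foldl_cons]
        rw [if_neg (by simp [hc])]
        rw [ih]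
        simp [hc, Prod.ext_iff]
        omega

-- B's interval recursion computed in closed form: 2·(count of '+' in s[lo:hi]) − (hi − lo)
theorem balGo_closed (l : List Char) (lo hi : Nat) (hlo : lo ≤ hi) (hhi : hi ≤ l.length) :
    balGo l lo hi = 2 * (((l.drop lo).take (hi - lo)).count '+' : Int) - ((hi : Int) - lo) := by
  by_cases h1 : hi - lo = 1
  · have hlt : lo < l.length := by omega
    have hsl : (l.drop lo).take (hi - lo) = [l[lo]] := by
      rw [h1, List.drop_eq_getElem_cons hlt, List.take_succ_cons, List.take_zero]
    rw [balGo, if_pos h1, hsl, List.getD_eq_getElem l ' ' hlt]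
    have hhl : (hi : Int) = (lo : Int) + 1 := by omega
    by_cases hc : l[lo] = '+'
    · simp [hc, hhl]
    · simp [hc, hhl]
  · by_cases h0 : hi ≤ lo
    · have he : hi = lo := by omega
      rw [balGo, if_neg h1, if_pos h0]
      simp [he]
    · rw [balGo, if_neg h1, if_neg h0]
      have hmid1 : lo < (lo + hi) / 2 := by omega
      have hmid2 : (lo + hi) / 2 < hi := by omega
      rw [balGo_closed l lo ((lo + hi) / 2) (by omega) (by omega),
          balGo_closed l ((lo + hi) / 2) hi (by omega) hhi]
      have hsplit : (l.drop lo).take (hi - lo)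
          = (l.drop lo).take ((lo + hi) / 2 - lo) ++ (l.drop ((lo + hi) / 2)).take (hi - (lo + hi) / 2) := by
        have h2 : hi - lo = ((lo + hi) / 2 - lo) + (hi - (lo + hi) / 2) := by omega
        have h3 : lo + ((lo + hi) / 2 - lo) = (lo + hi) / 2 := by omega
        rw [h2, List.take_add, List.drop_drop, h3]
      rw [hsplit, List.count_append]
      push_cast
      ring
termination_by hi - lo
decreasing_by all_goals omega

-- ===== VERDICT (by name: the statement is the Claim_ definition above) =====
theorem solve_spec : Claim_equal_solve := by
  intro n s _
  unfold Spec_solve solve solve_alt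
  rw [solve_foldl_closed, balGo_closed s.toList 0 s.toList.length (Nat.zero_le _) le_rfl]
  simp only [List.drop_zero, Nat.sub_zero, List.take_length, Nat.cast_zero, sub_zero]
  have hle : (s.toList.count '+' : Int) ≤ s.toList.length := by
    exact_mod_cast List.count_le_length
  have : (0 : Int) + s.toList.count '+' - (0 + ((s.toList.length : Int) - s.toList.count '+'))
      = 2 * (s.toList.count '+' : Int) - s.toList.length := by ring
  rw [this]
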